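-- pv_equiv track=rewrite | github.com/gabbychoi43/PythonExercise | programmers/Hash/베스트앨범.py | solution
-- ===== SOURCE A (Python) =====
-- def solution(genres, plays):
--     answer = []
--     score={}
--     for i in range(len(genres)) :
--         try :
--             score[genres[i]]+=plays[i]
--         except :
--             score[genres[i]]=plays[i]
--
--     Musics={}
--     for i in range(len(genres)) :
--         try :
--             Musics[genres[i]].append([i,plays[i]])
--         except :
--             Musics[genres[i]]=[[i,plays[i]]]
--     for i,j in Musics.items() :
--         j.sort(key=lambda x:x[0])
--         j.sort(key=lambda x:x[1],reverse=True)
--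
--     L=list(score.keys())
--     L.sort(key=lambda x:x[1],reverse=True)
--     for i in L :
--         answer.append(Musics[i][0][0])
--         if len(Musics[i])>1 :
--             answer.append(Musics[i][1][0])
--
--
--     return answer
-- ===== SOURCE B (Python) =====
-- def solution(genres, plays):
--     # One pass: per-genre top-2 selection (plays desc, earlier index wins ties)
--     # instead of building full per-genre lists and sorting them.
--     top2 = {}
--     for i, (g, p) in enumerate(zip(genres, plays)):
--         cur = top2.get(g, [])
--         if not cur:
--             new = [(i, p)]
--         elif p > cur[0][1]:
--             new = [(i, p), cur[0]]
--         elif len(cur) == 1 or p > cur[1][1]: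
--             new = [cur[0], (i, p)]
--         else:
--             new = cur
--         top2[g] = new
--     answer = []
--     for g in sorted(top2, key=lambda s: s[1], reverse=True):
--         answer.extend(i for i, _ in top2[g])
--     return answer
-- ===== Notes on version B (the rewrite author's own statement) =====
-- stated objective: faster
-- what changed: B builds, in one pass over enumerate(zip(genres, plays)), a per-genre running top-2 list (plays descending, earlier index wins ties) instead of A's two index-loops, per-genre full sorts and a separate score dict, then orders the genres by the same second-character key and concatenates the kept indices.
import Mathlib
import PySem

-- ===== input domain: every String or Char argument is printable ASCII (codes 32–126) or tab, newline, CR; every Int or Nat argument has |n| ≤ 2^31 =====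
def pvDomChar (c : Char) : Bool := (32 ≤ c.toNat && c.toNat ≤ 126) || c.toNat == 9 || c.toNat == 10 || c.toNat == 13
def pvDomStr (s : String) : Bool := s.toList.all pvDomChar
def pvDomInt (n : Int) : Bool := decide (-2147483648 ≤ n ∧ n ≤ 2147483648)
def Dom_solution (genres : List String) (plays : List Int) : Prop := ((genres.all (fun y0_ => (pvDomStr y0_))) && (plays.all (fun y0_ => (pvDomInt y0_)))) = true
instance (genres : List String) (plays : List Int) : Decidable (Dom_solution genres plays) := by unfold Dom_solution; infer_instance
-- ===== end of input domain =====

-- B replaces A's per-genre full sorts by a single-pass top-2 selection per genre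
-- (objective: faster, measured); equivalence is about the return value.

-- ===== PORT A =====
-- A-side helpers: the bodies of A's two dict-building loops (try/except = match on get?)
def scoreStepA (d : PySem.Dict String Int) (_i : Int) (g : String) (p : Int) : PySem.Dict String Int :=
  match d.get? g with
  | some v => d.insert g (v + p)   -- try: score[genres[i]] += plays[i]
  | none   => d.insert g p         -- except: score[genres[i]] = plays[i]

def musicStepA (d : PySem.Dict String (List (Int × Int))) (i : Int) (g : String) (p : Int) :
    PySem.Dict String (List (Int × Int)) :=
  match d.get? g with
  | some l => d.insert g (l ++ [(i, p)])   -- try: Musics[genres[i]].append([i, plays[i]])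
  | none   => d.insert g [(i, p)]          -- except: Musics[genres[i]] = [[i, plays[i]]]

def solution (genres : List String) (plays : List Int) : List Int :=
  let score : PySem.Dict String Int :=
    (PySem.List.pyRange 0 (PySem.List.len genres) 1).foldl
      (fun d i => scoreStepA d i (PySem.List.pyGetD genres i "") (PySem.List.pyGetD plays i 0))
      PySem.Dict.empty
  let musics : PySem.Dict String (List (Int × Int)) :=
    (PySem.List.pyRange 0 (PySem.List.len genres) 1).foldl
      (fun d i => musicStepA d i (PySem.List.pyGetD genres i "") (PySem.List.pyGetD plays i 0))
      PySem.Dict.empty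
  -- for i,j in Musics.items(): j.sort(key=x[0]); j.sort(key=x[1], reverse=True)
  let musics2 : PySem.Dict String (List (Int × Int)) :=
    PySem.Dict.mk (musics.items.map (fun kv =>
      (kv.1, PySem.List.sorted (PySem.List.sorted kv.2 (fun x => x.1)) (fun x => x.2) true)))
  -- L = list(score.keys()); L.sort(key=lambda x: x[1], reverse=True)
  let L := PySem.List.sorted score.keys (fun s => (PySem.Str.pyGet? s 1).getD ' ') true
  L.foldl (fun answer g =>
    let j := musics2.getD g []
    let answer := answer ++ [(PySem.List.pyGetD j 0 (0, 0)).1]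
    if PySem.List.len j > 1 then answer ++ [(PySem.List.pyGetD j 1 (0, 0)).1]
    else answer) []

-- ===== PORT B =====
-- B helper: update the current top-2 list with a new (index, plays) entry
def top2Step (cur : List (Int × Int)) (i p : Int) : List (Int × Int) :=
  match cur with
  | [] => [(i, p)]
  | c0 :: rest =>
    if p > c0.2 then [(i, p), c0]
    else
      match rest with
      | [] => [c0, (i, p)]
      | c1 :: _ => if p > c1.2 then [c0, (i, p)] else cur

def solution_alt (genres : List String) (plays : List Int) : List Int :=
  let top2 : PySem.Dict String (List (Int × Int)) :=
    (PySem.List.enumerate (genres.zip plays)).foldl (fun d x =>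
      d.insert x.2.1 (top2Step (d.getD x.2.1 []) x.1 x.2.2)) PySem.Dict.empty
  let L := PySem.List.sorted top2.keys (fun s => (PySem.Str.pyGet? s 1).getD ' ') true
  L.foldl (fun answer g => answer ++ (top2.getD g []).map (fun e => e.1)) []

-- ===== PRECONDITION & SPEC =====
-- Pre_ excludes exactly the inputs where the Python A raises IndexError: plays
-- shorter than genres (plays[i] out of range), or a genre string of length < 2
-- (the sort key x[1] out of range).
def Pre_solution (genres : List String) (plays : List Int) : Prop :=
  genres.length ≤ plays.length ∧ ∀ g ∈ genres, 2 ≤ g.toList.length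
instance (genres : List String) (plays : List Int) : Decidable (Pre_solution genres plays) := by
  unfold Pre_solution; infer_instance

def pvWitness_solution : List String × List Int := (["ab", "cd", "ab"], [1, 2, 3])

def Spec_solution (genres : List String) (plays : List Int) (out : List Int) : Prop := out = solution_alt genres plays
instance (genres : List String) (plays : List Int) (out : List Int) : Decidable (Spec_solution genres plays out) := by unfold Spec_solution; infer_instance

-- ===== CLAIM (what is proved, stated in full; the proofs are below) =====
def Claim_equal_solution : Prop := ∀ (genres : List String) (plays : List Int), Dom_solution genres plays → Pre_solution genres plays → Spec_solution genres plays (solution genres plays)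

-- ===== LEMMAS AND PROOFS =====

theorem pv_enumerate_shift {α : Type} (l : List α) (s : Int) :
    PySem.List.enumerate l (s + 1) = (PySem.List.enumerate l s).map (fun x => (x.1 + 1, x.2)) := by
  induction l generalizing s with
  | nil => rfl
  | cons a t ih => simp [PySem.List.enumerate, ih]

theorem pv_enumerate_one {α : Type} (l : List α) :
    PySem.List.enumerate l 1 = (PySem.List.enumerate l 0).map (fun x => (x.1 + 1, x.2)) := by
  have := pv_enumerate_shift l 0
  simpa using this

theorem pv_aux_fold {δ : Type} : ∀ (gs : List String) (ps : List Int), gs.length ≤ ps.length →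
    ∀ (f : δ → Int → String → Int → δ) (init : δ),
    (List.range gs.length).foldl (fun (d : δ) (k : Nat) => f d (k : Int) (gs.getD k "") (ps.getD k 0)) init
    = (PySem.List.enumerate (gs.zip ps) 0).foldl (fun d x => f d x.1 x.2.1 x.2.2) init := by
  intro gs
  induction gs with
  | nil => intro ps h f init; rfl
  | cons g t ih =>
    intro ps h f init
    cases ps with
    | nil => simp at h
    | cons p pt =>
      simp only [List.length_cons] at h ⊢
      rw [List.range_succ_eq_map]
      simp only [List.foldl_cons, List.foldl_map, List.getD_cons_zero]
      have hb : (fun (d : δ) (k : Nat) => f d ((Nat.succ k : Nat) : Int) ((g :: t).getD (Nat.succ k) "") ((p :: pt).getD (Nat.succ k) 0))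
          = fun (d : δ) (k : Nat) => (fun d i a b => f d (i + 1) a b) d (k : Int) (t.getD k "") (pt.getD k 0) := by
        funext d k
        simp only [List.getD_cons_succ]
        push_cast
        rfl
      rw [hb]
      simp only [List.zip_cons_cons, PySem.List.enumerate, List.foldl_cons, zero_add]
      rw [pv_enumerate_one, List.foldl_map]
      exact ih pt (by omega) (fun d i a b => f d (i + 1) a b) (f init 0 g p)

-- A's loop over range(len(genres)) is a loop over enumerate(zip(genres, plays))
theorem pv_range_fold_eq_enum_fold {δ : Type} (gs : List String) (ps : List Int)
    (h : gs.length ≤ ps.length) (f : δ → Int → String → Int → δ) (init : δ) :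
    (PySem.List.pyRange 0 (PySem.List.len gs) 1).foldl
      (fun d i => f d i (PySem.List.pyGetD gs i "") (PySem.List.pyGetD ps i 0)) init
    = (PySem.List.enumerate (gs.zip ps)).foldl (fun d x => f d x.1 x.2.1 x.2.2) init := by
  rw [show PySem.List.len gs = ((gs.length : Int)) from PySem.List.len_eq gs,
      PySem.List.pyRange_zero_natCast, List.foldl_map]
  simp only [PySem.List.pyGetD_natCast]
  exact pv_aux_fold gs ps h f init

-- getD after a keyed insert-fold: only the entries with the matching key matter
theorem pv_getD_foldl_insert_key {κ ν β : Type} [BEq κ] [LawfulBEq κ] [DecidableEq κ]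
    (l : List β) (key : β → κ) (step : ν → β → ν) (d : PySem.Dict κ ν) (g : κ) (d0 : ν) :
    (l.foldl (fun d x => d.insert (key x) (step (d.getD (key x) d0) x)) d).getD g d0
    = (l.filter (fun x => key x == g)).foldl step (d.getD g d0) := by
  induction l generalizing d with
  | nil => rfl
  | cons x t ih =>
    simp only [List.foldl_cons, List.filter_cons]
    rw [ih]
    by_cases hx : key x = g
    · subst hx; simp
    · simp [PySem.Dict.getD_insert, hx, Ne.symm hx]

-- get? through a dict whose values were mapped in place
theorem pv_get?_mk_map {κ ν ν' : Type} [BEq κ] (l : List (κ × ν)) (f : ν → ν') (g : κ) :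
    (PySem.Dict.mk (l.map (fun kv => (kv.1, f kv.2)))).get? g
    = ((PySem.Dict.mk l).get? g).map f := by
  induction l with
  | nil => simp [PySem.Dict.get?]
  | cons kv t ih =>
    obtain ⟨k, v⟩ := kv
    simp only [List.map_cons, PySem.Dict.get?_mk_cons]
    by_cases h : k == g
    · simp [h]
    · simp [h, ih]

-- taking 2 after a stable descending insertion is the top-2 scan step
theorem pv_take2_insertBy (x : Int × Int) (s : List (Int × Int)) :
    (PySem.List.insertBy (fun a b => decide ((b.2 : Int) < a.2)) x s).take 2
    = top2Step (s.take 2) x.1 x.2 := by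
  match s with
  | [] => simp [PySem.List.insertBy, top2Step]
  | [a] =>
    by_cases h : a.2 < x.2 <;>
      simp [PySem.List.insertBy, top2Step, h, gt_iff_lt]
  | a :: b :: t =>
    by_cases h1 : a.2 < x.2
    · simp [PySem.List.insertBy, top2Step, h1]
    · by_cases h2 : b.2 < x.2 <;>
        simp [PySem.List.insertBy, top2Step, h1, h2]

theorem pv_take2_foldl (l : List (Int × Int)) (s : List (Int × Int)) :
    (l.foldl (fun acc x => PySem.List.insertBy (fun a b => decide ((b.2 : Int) < a.2)) x acc) s).take 2
    = l.foldl (fun cur x => top2Step cur x.1 x.2) (s.take 2) := by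
  induction l generalizing s with
  | nil => rfl
  | cons x t ih => simp only [List.foldl_cons]; rw [ih, pv_take2_insertBy]

-- the first two entries of the stable descending sort are computed by the top-2 scan
theorem pv_take2_sorted_rev (l : List (Int × Int)) :
    (PySem.List.sorted l (fun x => x.2) true).take 2
    = l.foldl (fun cur x => top2Step cur x.1 x.2) [] := by
  rw [PySem.List.sorted_rev_eq_foldl_insertBy]
  exact pv_take2_foldl l []

theorem pv_enumerate_pairwise {α : Type} (l : List α) (s : Int) :
    (PySem.List.enumerate l s).Pairwise (fun a b => a.1 < b.1) := by
  induction l generalizing s with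
  | nil => exact List.Pairwise.nil
  | cons a t ih =>
    refine List.Pairwise.cons ?_ (ih (s + 1))
    intro y hy
    have hmono : ∀ (u : List α) (r : Int), ∀ z ∈ PySem.List.enumerate u r, r ≤ z.1 := by
      intro u
      induction u with
      | nil => intro r z hz; simp [PySem.List.enumerate] at hz
      | cons b v ihv =>
        intro r z hz
        simp only [PySem.List.enumerate, List.mem_cons] at hz
        rcases hz with h | h
        · simp [h]
        · have := ihv (r + 1) z h; omega
    have := hmono t (s + 1) y hy
    simpa using by omega

theorem pv_keysA (ez : List (Int × (String × Int))) :
    (ez.foldl (fun d x => scoreStepA d x.1 x.2.1 x.2.2) PySem.Dict.empty).keys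
    = PySem.Set.update ([] : PySem.Set String) (ez.map (fun x => x.2.1)) := by
  have hstep : (fun (d : PySem.Dict String Int) (x : Int × (String × Int)) => scoreStepA d x.1 x.2.1 x.2.2)
      = fun d x => d.insert x.2.1 ((fun (d : PySem.Dict String Int) (x : Int × (String × Int)) =>
          match d.get? x.2.1 with | some v => v + x.2.2 | none => x.2.2) d x) := by
    funext d x
    unfold scoreStepA
    beta_reduce
    cases d.get? x.2.1 <;> simp
  rw [hstep, PySem.Dict.keys_foldl_insert_key]
  rfl

theorem pv_keysB (ez : List (Int × (String × Int))) :
    (ez.foldl (fun d x => d.insert x.2.1 (top2Step (d.getD x.2.1 []) x.1 x.2.2)) PySem.Dict.empty).keys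
    = PySem.Set.update ([] : PySem.Set String) (ez.map (fun x => x.2.1)) := by
  rw [PySem.Dict.keys_foldl_insert_key]
  rfl

theorem pv_musicStep_eq (d : PySem.Dict String (List (Int × Int))) (x : Int × (String × Int)) :
    musicStepA d x.1 x.2.1 x.2.2
    = d.insert x.2.1 ((fun cur (y : Int × (String × Int)) => cur ++ [(y.1, y.2.2)]) (d.getD x.2.1 []) x) := by
  unfold musicStepA
  beta_reduce
  rw [PySem.Dict.getD_eq_get?_getD]
  cases d.get? x.2.1 <;> simp

theorem pv_musics_getD (ez : List (Int × (String × Int))) (g : String) :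
    (ez.foldl (fun d x => musicStepA d x.1 x.2.1 x.2.2) PySem.Dict.empty).getD g []
    = (ez.filter (fun x => x.2.1 == g)).map (fun x => (x.1, x.2.2)) := by
  have hstep : (fun (d : PySem.Dict String (List (Int × Int))) (x : Int × (String × Int)) => musicStepA d x.1 x.2.1 x.2.2)
      = fun d x => d.insert x.2.1 ((fun cur (y : Int × (String × Int)) => cur ++ [(y.1, y.2.2)]) (d.getD x.2.1 []) x) := by
    funext d x; exact pv_musicStep_eq d x
  rw [hstep, pv_getD_foldl_insert_key ez (fun x => x.2.1) (fun cur y => cur ++ [(y.1, y.2.2)]) PySem.Dict.empty g []]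
  rw [show (PySem.Dict.empty : PySem.Dict String (List (Int × Int))).getD g [] = [] from rfl]
  rw [PySem.List.foldl_append_singleton_eq_map]
  simp

theorem pv_top2_getD (ez : List (Int × (String × Int))) (g : String) :
    (ez.foldl (fun d x => d.insert x.2.1 (top2Step (d.getD x.2.1 []) x.1 x.2.2)) PySem.Dict.empty).getD g []
    = ((ez.filter (fun x => x.2.1 == g)).map (fun x => (x.1, x.2.2))).foldl
        (fun cur y => top2Step cur y.1 y.2) [] := by
  rw [pv_getD_foldl_insert_key ez (fun x => x.2.1) (fun cur y => top2Step cur y.1 y.2.2) PySem.Dict.empty g []]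
  rw [List.foldl_map]
  rfl

theorem pv_keysM (ez : List (Int × (String × Int))) :
    (ez.foldl (fun d x => musicStepA d x.1 x.2.1 x.2.2) PySem.Dict.empty).keys
    = PySem.Set.update ([] : PySem.Set String) (ez.map (fun x => x.2.1)) := by
  have hstep : (fun (d : PySem.Dict String (List (Int × Int))) (x : Int × (String × Int)) => musicStepA d x.1 x.2.1 x.2.2)
      = fun d x => d.insert x.2.1 ((fun cur (y : Int × (String × Int)) => cur ++ [(y.1, y.2.2)]) (d.getD x.2.1 []) x) := by
    funext d x; exact pv_musicStep_eq d x
  rw [hstep]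
  rw [PySem.Dict.keys_foldl_insert_key ez (fun x => x.2.1)
        (fun d x => (fun cur (y : Int × (String × Int)) => cur ++ [(y.1, y.2.2)]) (d.getD x.2.1 []) x)]
  rfl

theorem pv_core (ez : List (Int × (String × Int)))
    (hpw : ez.Pairwise (fun a b => a.1 < b.1)) :
    (PySem.List.sorted
      (ez.foldl (fun d x => scoreStepA d x.1 x.2.1 x.2.2) PySem.Dict.empty).keys
      (fun s => (PySem.Str.pyGet? s 1).getD ' ') true).foldl (fun answer g =>
        let j := (PySem.Dict.mk
          ((ez.foldl (fun d x => musicStepA d x.1 x.2.1 x.2.2) PySem.Dict.empty).items.map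
            (fun kv => (kv.1, PySem.List.sorted (PySem.List.sorted kv.2 (fun x => x.1)) (fun x => x.2) true)))).getD g []
        let answer := answer ++ [(PySem.List.pyGetD j 0 (0, 0)).1]
        if PySem.List.len j > 1 then answer ++ [(PySem.List.pyGetD j 1 (0, 0)).1]
        else answer) []
    = (PySem.List.sorted
        (ez.foldl (fun d x => d.insert x.2.1 (top2Step (d.getD x.2.1 []) x.1 x.2.2)) PySem.Dict.empty).keys
        (fun s => (PySem.Str.pyGet? s 1).getD ' ') true).foldl (fun answer g =>
          answer ++ ((ez.foldl (fun d x => d.insert x.2.1 (top2Step (d.getD x.2.1 []) x.1 x.2.2)) PySem.Dict.empty).getD g []).map (fun e => e.1)) [] := by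
  rw [pv_keysA, pv_keysB]
  apply PySem.List.foldl_congr_mem
  intro acc g hg
  have hgmem : g ∈ ez.map (fun x => x.2.1) := by
    have h1 := (PySem.List.mem_sorted _ _ _ g).mp hg
    have h2 := (PySem.Set.mem_update ([] : PySem.Set String) _ g).mp h1
    simpa using h2
  obtain ⟨x, hxez, hxg⟩ := List.mem_map.mp hgmem
  have hflne : ez.filter (fun y => y.2.1 == g) ≠ [] := by
    intro hnil
    have hx : x ∈ ez.filter (fun y => y.2.1 == g) := List.mem_filter.mpr ⟨hxez, by simp [hxg]⟩
    simp [hnil] at hx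
  have hagne : (ez.filter (fun y => y.2.1 == g)).map (fun y => (y.1, y.2.2)) ≠ [] := by
    simpa using hflne
  have hpag : ((ez.filter (fun y => y.2.1 == g)).map (fun y => (y.1, y.2.2))).Pairwise
      (fun (a b : Int × Int) => a.1 ≤ b.1) := by
    rw [List.pairwise_map]
    exact (hpw.filter _).imp (fun h => le_of_lt h)
  have hgM : g ∈ (ez.foldl (fun d x => musicStepA d x.1 x.2.1 x.2.2) PySem.Dict.empty).keys := by
    rw [pv_keysM]
    exact (PySem.Set.mem_update _ _ g).mpr (Or.inr hgmem)
  have hsome : (ez.foldl (fun d x => musicStepA d x.1 x.2.1 x.2.2) PySem.Dict.empty).get? g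
      = some ((ez.filter (fun y => y.2.1 == g)).map (fun y => (y.1, y.2.2))) := by
    cases hq : (ez.foldl (fun d x => musicStepA d x.1 x.2.1 x.2.2) PySem.Dict.empty).get? g with
    | none =>
      exact absurd ((PySem.Dict.get?_eq_none_iff_not_mem_keys _ _).mp hq) (not_not_intro hgM)
    | some v =>
      have hgd := pv_musics_getD ez g
      rw [PySem.Dict.getD_eq_get?_getD, hq] at hgd
      simpa using congrArg some hgd
  have hM2 : (PySem.Dict.mk
        ((ez.foldl (fun d x => musicStepA d x.1 x.2.1 x.2.2) PySem.Dict.empty).items.map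
          (fun kv => (kv.1, PySem.List.sorted (PySem.List.sorted kv.2 (fun x => x.1)) (fun x => x.2) true)))).getD g []
      = PySem.List.sorted ((ez.filter (fun y => y.2.1 == g)).map (fun y => (y.1, y.2.2))) (fun x => x.2) true := by
    rw [PySem.Dict.getD_eq_get?_getD, pv_get?_mk_map _ (fun (v : List (Int × Int)) => PySem.List.sorted (PySem.List.sorted v (fun x => x.1)) (fun x => x.2) true) g, hsome]
    simp only [Option.map_some, Option.getD_some]
    rw [PySem.List.sorted_eq_self_of_pairwise _ (fun (x : Int × Int) => x.1) hpag]
  have hT : (ez.foldl (fun d x => d.insert x.2.1 (top2Step (d.getD x.2.1 []) x.1 x.2.2)) PySem.Dict.empty).getD g []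
      = (PySem.List.sorted ((ez.filter (fun y => y.2.1 == g)).map (fun y => (y.1, y.2.2))) (fun x => x.2) true).take 2 := by
    rw [pv_top2_getD, ← pv_take2_sorted_rev]
  simp only [hM2, hT]
  have hjne : PySem.List.sorted ((ez.filter (fun y => y.2.1 == g)).map (fun y => (y.1, y.2.2))) (fun x => x.2) true ≠ [] := by
    rw [Ne, PySem.List.sorted_eq_nil_iff]
    exact hagne
  cases hj : PySem.List.sorted ((ez.filter (fun y => y.2.1 == g)).map (fun y => (y.1, y.2.2))) (fun x => x.2) true with
  | nil => exact absurd hj hjne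
  | cons a rest =>
    cases rest with
    | nil =>
      simp [PySem.List.len, PySem.List.pyGetD_zero_cons]
    | cons b r =>
      have hlen : PySem.List.len (a :: b :: r) > 1 := by
        rw [PySem.List.len_eq]
        simp only [List.length_cons]
        push_cast
        omega
      rw [if_pos hlen]
      have h0 : PySem.List.pyGetD (a :: b :: r) 0 (0, 0) = a := PySem.List.pyGetD_zero_cons a _ _
      have h1 : PySem.List.pyGetD (a :: b :: r) 1 (0, 0) = b := by
        rw [show (1 : Int) = ((1 : Nat) : Int) by norm_num, PySem.List.pyGetD_natCast]
        rfl
      rw [h0, h1]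
      simp [List.take]

-- ===== VERDICT (by name: the statement is the Claim_ definition above) =====
theorem solution_spec : Claim_equal_solution := by
  intro genres plays _hdom hpre
  unfold Spec_solution
  obtain ⟨h1, _h2⟩ := hpre
  simp only [solution, solution_alt]
  rw [pv_range_fold_eq_enum_fold genres plays h1 scoreStepA,
      pv_range_fold_eq_enum_fold genres plays h1 musicStepA]
  exact pv_core (PySem.List.enumerate (genres.zip plays)) (pv_enumerate_pairwise _ 0)
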